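-- pv_equiv track=rewrite | github.com/IoBT-VISTEC/ApSense | model/runner_regressor.py | ends
-- ===== SOURCE A (Python) =====
-- def ends(seq):
--     curr = 0
--     count = 0
--     for item in seq:
--         if item != 0:
--             curr = 1
--         else: # reverts from 1 to 0
--             if curr == 1:
--                 count += 1
--                 curr = 0
--     return count
-- ===== SOURCE B (Python) =====
-- def ends(seq):
--     # Compress the sequence into run keys (True = nonzero run, False = zero run),
--     # then count nonzero runs, excluding a trailing nonzero run.
--     keys = []
--     for x in seq:
--         k = x != 0
--         if not keys or keys[-1] != k:
--             keys.append(k)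
--     count = keys.count(True)
--     if keys and keys[-1]:
--         count -= 1
--     return count
-- ===== Notes on version B (the rewrite author's own statement) =====
-- stated objective: alternative
-- what changed: B first compresses the sequence into a list of run keys (nonzero/zero) and then counts the nonzero runs, subtracting one for a trailing nonzero run, instead of A's single-pass flag machine that increments at each zero ending a nonzero run.
import Mathlib
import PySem

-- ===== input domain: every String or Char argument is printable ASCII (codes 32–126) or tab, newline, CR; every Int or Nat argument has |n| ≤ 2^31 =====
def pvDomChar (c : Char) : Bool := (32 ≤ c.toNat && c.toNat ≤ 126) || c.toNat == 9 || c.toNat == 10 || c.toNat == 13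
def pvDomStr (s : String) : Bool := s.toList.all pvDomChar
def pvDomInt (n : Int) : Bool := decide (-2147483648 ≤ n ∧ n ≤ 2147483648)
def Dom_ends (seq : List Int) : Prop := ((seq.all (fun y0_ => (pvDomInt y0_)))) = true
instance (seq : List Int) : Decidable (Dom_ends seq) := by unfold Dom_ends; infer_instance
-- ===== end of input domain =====

-- B compresses the sequence into run keys and counts nonzero runs minus a trailing one,
-- instead of A's flag-machine single pass; same O(n) cost (objective: alternative).


-- ===== PORT A =====
-- loop body of A: state (curr, count)
def endsStep (st : Int × Int) (item : Int) : Int × Int :=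
  if item ≠ 0 then (1, st.2)
  else if st.1 = 1 then (0, st.2 + 1) else st

def ends (seq : List Int) : Int :=
  (seq.foldl endsStep (0, 0)).2

-- ===== PORT B =====
-- loop body of B: append the run key when it changes
def keyStep (ks : List Bool) (x : Int) : List Bool :=
  let k : Bool := decide (x ≠ 0)
  if ks.getLast? = some k then ks else ks ++ [k]

def ends_alt (seq : List Int) : Int :=
  let keys := seq.foldl keyStep []
  let count : Int := keys.count true
  if keys.getLast? = some true then count - 1 else count

-- ===== PRECONDITION & SPEC =====
def Spec_ends (seq : List Int) (out : Int) : Prop := out = ends_alt seq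
instance (seq : List Int) (out : Int) : Decidable (Spec_ends seq out) := by unfold Spec_ends; infer_instance

-- ===== CLAIM (what is proved, stated in full; the proofs are below) =====
def Claim_equal_ends : Prop := ∀ (seq : List Int), Dom_ends seq → Spec_ends seq (ends seq)

-- ===== LEMMAS AND PROOFS =====

-- common characterisation: fg false = count of nonzero runs terminated by a zero;
-- fg true = the same while currently inside a nonzero run
def fg : Bool → List Int → Int
  | _, [] => 0
  | b, x :: xs => if x ≠ 0 then fg true xs else if b then 1 + fg false xs else fg false xs

-- A's fold in terms of fg
theorem endsA_fold (xs : List Int) : ∀ c : Int,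
    (xs.foldl endsStep (0, c)).2 = c + fg false xs ∧
    (xs.foldl endsStep (1, c)).2 = c + fg true xs := by
  induction xs with
  | nil => intro c; simp [fg]
  | cons x xs ih =>
    intro c
    by_cases hx : x = 0
    · subst hx
      constructor
      · simpa [endsStep, fg] using (ih c).1
      · simpa [endsStep, fg, add_assoc] using (ih (c + 1)).1
    · constructor
      · simpa [endsStep, fg, hx] using (ih c).2
      · simpa [endsStep, fg, hx] using (ih c).2

-- recursive form of B's key-compression fold
def keysAux : Option Bool → List Int → List Bool
  | _, [] => []
  | p, x :: xs =>
    let k : Bool := decide (x ≠ 0)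
    if p = some k then keysAux p xs else k :: keysAux (some k) xs

theorem keys_fold (xs : List Int) : ∀ ks : List Bool,
    xs.foldl keyStep ks = ks ++ keysAux ks.getLast? xs := by
  induction xs with
  | nil => intro ks; simp [keysAux]
  | cons x xs ih =>
    intro ks
    show List.foldl keyStep (keyStep ks x) xs = ks ++ keysAux ks.getLast? (x :: xs)
    by_cases h : ks.getLast? = some (decide (x ≠ 0))
    · have h1 : keyStep ks x = ks := by simp [keyStep, h]
      have h2 : keysAux ks.getLast? (x :: xs) = keysAux ks.getLast? xs := by
        rw [h]; simp [keysAux]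
      rw [h1, h2, ih ks]
    · have h1 : keyStep ks x = ks ++ [decide (x ≠ 0)] := by
        unfold keyStep; rw [if_neg h]
      have h2 : keysAux ks.getLast? (x :: xs)
          = decide (x ≠ 0) :: keysAux (some (decide (x ≠ 0))) xs := by
        simp only [keysAux]
        rw [if_neg h]
      rw [h1, h2, ih (ks ++ [decide (x ≠ 0)]), List.getLast?_concat, List.append_assoc]
      rfl

-- B's tail: count of true keys, minus one for a trailing true
def cntK (ks : List Bool) : Int :=
  (ks.count true : Int) - (if ks.getLast? = some true then 1 else 0)

theorem cntK_false_cons (ks : List Bool) : cntK (false :: ks) = cntK ks := by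
  cases ks with
  | nil => simp [cntK]
  | cons a l => simp [cntK, List.count_cons]

theorem cntK_true_cons (ks : List Bool) (h : ks ≠ []) :
    cntK (true :: ks) = 1 + cntK ks := by
  cases ks with
  | nil => exact absurd rfl h
  | cons a l => simp [cntK, List.count_cons]; ring

theorem cntK_keysAux (xs : List Int) :
    (cntK (keysAux none xs) = fg false xs ∧ cntK (keysAux (some false) xs) = fg false xs) ∧
    cntK (true :: keysAux (some true) xs) = fg true xs := by
  induction xs with
  | nil => simp [keysAux, fg, cntK]
  | cons x xs ih =>
    by_cases hx : x = 0
    · subst hx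
      refine ⟨⟨?_, ?_⟩, ?_⟩
      · simpa [keysAux, fg, cntK_false_cons] using ih.1.2
      · simpa [keysAux, fg] using ih.1.2
      · have h1 : keysAux (some true) ((0:Int) :: xs) = false :: keysAux (some false) xs := by
          simp [keysAux]
        rw [h1, cntK_true_cons _ (by simp), cntK_false_cons]
        simp [fg, ih.1.2]
    · have h1 : ∀ p : Option Bool, p = none ∨ p = some false →
          keysAux p (x :: xs) = true :: keysAux (some true) xs := by
        rintro p (rfl | rfl) <;> simp [keysAux, hx]
      refine ⟨⟨?_, ?_⟩, ?_⟩
      · rw [h1 none (Or.inl rfl)]; simpa [fg, hx] using ih.2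
      · rw [h1 (some false) (Or.inr rfl)]; simpa [fg, hx] using ih.2
      · have h2 : keysAux (some true) (x :: xs) = keysAux (some true) xs := by
          simp [keysAux, hx]
        rw [h2]; simpa [fg, hx] using ih.2

-- ===== VERDICT (by name: the statement is the Claim_ definition above) =====
theorem ends_spec : Claim_equal_ends := by
  intro seq _
  simp only [Spec_ends, ends, ends_alt]
  rw [keys_fold]
  simp only [List.getLast?_nil, List.nil_append]
  rw [(endsA_fold seq 0).1, ← (cntK_keysAux seq).1.1]
  unfold cntK
  split_ifs <;> ring
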